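-- pv_equiv track=rewrite | github.com/ColinFendrick/CodeWarsSolutions | strip-comments.py | solution
-- ===== SOURCE A (Python) =====
-- def solution(string, markers):
-- 	lines = string.split('\n')
-- 	for i, line in enumerate(lines):
-- 		for marker in markers:
-- 			index = line.find(marker)
-- 			if index != -1:
-- 				line = line[:index]
-- 			lines[i] = line.rstrip(' ')
-- 	return '\n'.join(lines)
-- ===== SOURCE B (Python) =====
-- def solution(string, markers):
--     if not markers:
--         return string
--     out = []
--     for line in string.split('\n'):
--         for p in range(len(line) + 1):
--             if any(line.startswith(m, p) for m in markers):
--                 line = line[:p]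
--                 break
--         out.append(line.rstrip(' '))
--     return '\n'.join(out)
-- ===== Notes on version B (the rewrite author's own statement) =====
-- stated objective: idiomatic
-- what changed: B scans each line position by position (left to right) and cuts at the first position where any marker matches -- a regex-engine-style leftmost-match over the marker alternation -- instead of A's marker-by-marker loop that repeatedly truncates the line and re-runs find on the shrunken string; with no markers B returns the string unchanged. …
-- outside the precondition, e.g. on solution('zab', ['b', 'ab']): A returns 'za', B returns 'z'
import Mathlib
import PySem

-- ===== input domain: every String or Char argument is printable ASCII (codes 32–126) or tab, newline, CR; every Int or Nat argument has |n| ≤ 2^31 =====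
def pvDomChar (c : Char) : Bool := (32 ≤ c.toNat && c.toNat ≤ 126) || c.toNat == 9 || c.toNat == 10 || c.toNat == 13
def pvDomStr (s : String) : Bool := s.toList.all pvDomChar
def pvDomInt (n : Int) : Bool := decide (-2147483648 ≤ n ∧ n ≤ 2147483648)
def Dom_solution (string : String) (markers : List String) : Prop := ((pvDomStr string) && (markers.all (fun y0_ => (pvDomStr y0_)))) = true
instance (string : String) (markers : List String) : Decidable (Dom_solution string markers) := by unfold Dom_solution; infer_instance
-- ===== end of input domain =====

-- B cuts each line at the first position where any marker starts (a position-by-position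
-- leftmost-match scan) instead of A's marker-by-marker repeated truncate-and-refind;
-- Pre_ excludes the order-dependent overlapping-marker corner, where both values are defensible.

-- exact port of Python's str.rstrip(' '): drop trailing ' ' characters (used by both ports)
def pvRstripSp (cs : List Char) : List Char := (cs.reverse.dropWhile (· == ' ')).reverse

-- ===== PORT A =====
-- the body of A's outer loop for one line: for marker in markers: find/truncate; lines[i] = line.rstrip(' ')
-- (the pair carries (line, lines[i]); with markers = [] the cell keeps the original line, never rstripped)
def solutionLine (markers : List String) (cs : List Char) : List Char :=
  (markers.foldl (fun (st : List Char × List Char) marker =>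
      let line := st.1
      let index := PySem.Chars.find line marker.toList
      let line := if index ≠ -1 then PySem.Chars.slice line none (some index) else line
      (line, pvRstripSp line)) (cs, cs)).2

def solution (string : String) (markers : List String) : String :=
  String.ofList (PySem.Chars.join ['\n']
    ((PySem.Chars.splitOn string.toList ['\n']).map (solutionLine markers)))

-- ===== PORT B =====
-- B's inner 'for p in range(len(line)+1): if any(line.startswith(m, p) …): line = line[:p]; break'
-- as find? over the same range (Python's startswith(m, p) with 0 ≤ p ≤ len(line) is exactly
-- m <+: line.drop p, i.e. PySem.Chars.startswith (cs.drop p) m; line[:p] with 0 ≤ p is cs.take p)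
def solutionAltLine (markers : List String) (cs : List Char) : List Char :=
  match (List.range (cs.length + 1)).find?
      (fun p => markers.any (fun m => PySem.Chars.startswith (cs.drop p) m.toList)) with
  | some p => pvRstripSp (cs.take p)
  | none => pvRstripSp cs

def solution_alt (string : String) (markers : List String) : String :=
  if markers.isEmpty then string
  else String.ofList (PySem.Chars.join ['\n']
    ((PySem.Chars.splitOn string.toList ['\n']).map (solutionAltLine markers)))

-- ===== PRECONDITION & SPEC =====
-- first occurrence of m in line, with line.length standing for 'absent' (an input inspection)
def pvFirstOcc (line m : List Char) : Nat :=
  if PySem.Chars.find line m = -1 then line.length else (PySem.Chars.find line m).toNat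

-- earliest first occurrence of any of ms in line
def pvMinOcc (line : List Char) (ms : List String) : Nat :=
  ms.foldl (fun c m => min c (pvFirstOcc line m.toList)) line.length

-- some line has an occurrence of a later-listed marker that starts strictly before, and reaches
-- strictly past, the earliest occurrence of the markers listed before it
def pvOverlap (markers : List String) (line : List Char) : Bool :=
  (List.range markers.length).any fun k =>
    match markers[k]? with
    | some mk =>
        decide (pvFirstOcc line mk.toList < pvMinOcc line (markers.take k)
          ∧ pvMinOcc line (markers.take k) < pvFirstOcc line mk.toList + mk.toList.length)
    | none => false

-- Pre_ excludes inputs where an occurrence of a later-listed marker overlaps the earliest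
-- occurrence of an earlier-listed marker from the left: there the cut depends on the order the
-- markers are processed, an unspecified corner on which A's order-dependent sequential
-- truncation and B's leftmost-match cut are both defensible.
def Pre_solution (string : String) (markers : List String) : Prop :=
  ((PySem.Chars.splitOn string.toList ['\n']).all (fun l => !(pvOverlap markers l))) = true
instance (string : String) (markers : List String) : Decidable (Pre_solution string markers) := by unfold Pre_solution; infer_instance

def pvWitness_solution : String × List String := ("a # b ", ["#", "!"])

def Spec_solution (string : String) (markers : List String) (out : String) : Prop := out = solution_alt string markers
instance (string : String) (markers : List String) (out : String) : Decidable (Spec_solution string markers out) := by unfold Spec_solution; infer_instance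

-- ===== CLAIM (what is proved, stated in full; the proofs are below) =====
def Claim_equal_solution : Prop := ∀ (string : String) (markers : List String), Dom_solution string markers → Pre_solution string markers → Spec_solution string markers (solution string markers)

-- ===== LEMMAS AND PROOFS =====

-- A's per-line fold with only the line component (proof device)
def truncFold (markers : List String) (ℓ : List Char) : List Char :=
  markers.foldl (fun line marker =>
    let index := PySem.Chars.find line marker.toList
    if index ≠ -1 then PySem.Chars.slice line none (some index) else line) ℓ

theorem pairFold_eq (markers : List String) : ∀ (ℓ x : List Char),
    markers.foldl (fun (st : List Char × List Char) marker =>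
      let line := st.1
      let index := PySem.Chars.find line marker.toList
      let line := if index ≠ -1 then PySem.Chars.slice line none (some index) else line
      (line, pvRstripSp line)) (ℓ, x)
    = (truncFold markers ℓ, if markers.isEmpty then x else pvRstripSp (truncFold markers ℓ)) := by
  induction markers with
  | nil => intro ℓ x; simp [truncFold]
  | cons m ms ih =>
    intro ℓ x
    simp only [List.foldl, truncFold, List.isEmpty_cons]
    rw [ih]
    cases ms with
    | nil => simp [truncFold]
    | cons m' ms' => simp [truncFold]

-- basic facts about pvFirstOcc
theorem pvFirstOcc_occ {line m : List Char} (h : PySem.Chars.find line m ≠ -1) :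
    m <+: line.drop (pvFirstOcc line m) ∧ ∀ j < pvFirstOcc line m, ¬ m <+: line.drop j := by
  have h0 : (0 : Int) ≤ PySem.Chars.find line m := by
    have := PySem.Chars.neg_one_le_find line m; omega
  have := PySem.Chars.find_spec (s := line) (sub := m) h0
  unfold pvFirstOcc
  rw [if_neg h]
  exact this

theorem pvFirstOcc_min {line m : List Char} {j : Nat} (h : m <+: line.drop j) :
    PySem.Chars.find line m ≠ -1 ∧ pvFirstOcc line m ≤ j := by
  have hin : PySem.Chars.find line m ≠ -1 := by
    rw [PySem.Chars.find_ne_neg_one_iff]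
    exact h.isInfix.trans (List.drop_suffix _ _).isInfix
  refine ⟨hin, ?_⟩
  by_contra hlt
  exact (pvFirstOcc_occ hin).2 j (by omega) h

-- pvMinOcc: a running minimum
theorem foldl_min_le_init {α : Type} (f : α → Nat) : ∀ (ms : List α) (c : Nat),
    ms.foldl (fun c m => min c (f m)) c ≤ c := by
  intro ms
  induction ms with
  | nil => intro c; exact le_rfl
  | cons m t ih =>
    intro c
    exact le_trans (ih (min c (f m))) (by omega)

theorem foldl_min_le_mem {α : Type} (f : α → Nat) : ∀ (ms : List α) (c : Nat) (m : α),
    m ∈ ms → ms.foldl (fun c m => min c (f m)) c ≤ f m := by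
  intro ms
  induction ms with
  | nil => intro c m hm; cases hm
  | cons a t ih =>
    intro c m hm
    rcases List.mem_cons.mp hm with h | h
    · subst h
      exact le_trans (foldl_min_le_init f t _) (Nat.min_le_right _ _)
    · exact ih _ m h

theorem foldl_min_achieved {α : Type} (f : α → Nat) : ∀ (ms : List α) (c : Nat),
    ms.foldl (fun c m => min c (f m)) c = c
      ∨ ∃ m ∈ ms, f m = ms.foldl (fun c m => min c (f m)) c := by
  intro ms
  induction ms with
  | nil => intro c; left; rfl
  | cons a t ih =>
    intro c
    rcases ih (min c (f a)) with h | ⟨m, hm, hfm⟩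
    · simp only [List.foldl, h]
      rcases Nat.le_total c (f a) with hle | hle
      · left; omega
      · right; exact ⟨a, List.mem_cons_self, by omega⟩
    · right
      exact ⟨m, List.mem_cons_of_mem a hm, by simpa using hfm⟩

theorem pvMinOcc_le (line : List Char) (ms : List String) : pvMinOcc line ms ≤ line.length :=
  foldl_min_le_init _ ms _

theorem pvMinOcc_le_mem {line : List Char} {ms : List String} {m : String} (h : m ∈ ms) :
    pvMinOcc line ms ≤ pvFirstOcc line m.toList :=
  foldl_min_le_mem _ ms _ m h

theorem pvMinOcc_achieved (line : List Char) (ms : List String) :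
    pvMinOcc line ms = line.length
      ∨ ∃ m ∈ ms, pvFirstOcc line m.toList = pvMinOcc line ms := by
  rcases foldl_min_achieved (fun m : String => pvFirstOcc line m.toList) ms line.length with h | h
  · left; exact h
  · right; exact h

-- occurrence bridge: marker starts at j inside the first c characters
theorem occ_mp {cs m : List Char} {c j : Nat} (h : m <+: (cs.take c).drop j) (hj : j ≤ c) :
    m <+: cs.drop j ∧ j + m.length ≤ c := by
  rw [List.drop_take, List.prefix_take_iff] at h
  exact ⟨h.1, by omega⟩

theorem occ_mpr {cs m : List Char} {c j : Nat} (h1 : m <+: cs.drop j) (h2 : j + m.length ≤ c) :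
    m <+: (cs.take c).drop j := by
  rw [List.drop_take, List.prefix_take_iff]
  exact ⟨h1, by omega⟩

-- A's per-marker step on only the cut index (proof device)
def stepN (cs : List Char) (c : Nat) (m : String) : Nat :=
  if pvFirstOcc cs m.toList + m.toList.length ≤ c then pvFirstOcc cs m.toList else c

-- one marker: A's truncation of the prefix cs.take c is the prefix at stepN
theorem stepA_eq (cs : List Char) (c : Nat) (hc : c ≤ cs.length) (m : String) :
    (if PySem.Chars.find (cs.take c) m.toList ≠ -1
     then PySem.Chars.slice (cs.take c) none (some (PySem.Chars.find (cs.take c) m.toList))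
     else cs.take c) = cs.take (stepN cs c m) ∧ stepN cs c m ≤ c := by
  by_cases hfit : pvFirstOcc cs m.toList + m.toList.length ≤ c
  · -- the first occurrence fits inside the prefix: A finds exactly it
    have hne : PySem.Chars.find cs m.toList ≠ -1 := by
      by_contra habs
      have : pvFirstOcc cs m.toList = cs.length := by unfold pvFirstOcc; rw [if_pos habs]
      have hm0 : m.toList.length = 0 := by omega
      rw [List.length_eq_zero_iff] at hm0
      rw [hm0] at habs
      simp [PySem.Chars.find_nil] at habs
    obtain ⟨hocc, hmin⟩ := pvFirstOcc_occ hne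
    have hocc' : m.toList <+: (cs.take c).drop (pvFirstOcc cs m.toList) :=
      occ_mpr hocc hfit
    have hne' : PySem.Chars.find (cs.take c) m.toList ≠ -1 := by
      rw [PySem.Chars.find_ne_neg_one_iff]
      exact hocc'.isInfix.trans (List.drop_suffix _ _).isInfix
    have h0' : (0 : Int) ≤ PySem.Chars.find (cs.take c) m.toList := by
      have := PySem.Chars.neg_one_le_find (cs.take c) m.toList; omega
    obtain ⟨hoccp, hminp⟩ := PySem.Chars.find_spec (s := cs.take c) (sub := m.toList) h0'
    have hjc : (PySem.Chars.find (cs.take c) m.toList).toNat ≤ c := by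
      have h1 := PySem.Chars.find_le_length (cs.take c) m.toList
      have h2 : (cs.take c).length = c := by simp [List.length_take]; omega
      omega
    obtain ⟨hoccL, hfitL⟩ := occ_mp hoccp hjc
    -- the two first occurrences coincide
    have hle1 : pvFirstOcc cs m.toList ≤ (PySem.Chars.find (cs.take c) m.toList).toNat :=
      (pvFirstOcc_min hoccL).2
    have hle2 : (PySem.Chars.find (cs.take c) m.toList).toNat ≤ pvFirstOcc cs m.toList := by
      by_contra habs
      exact hminp (pvFirstOcc cs m.toList) (by omega) hocc'
    have heq : (PySem.Chars.find (cs.take c) m.toList).toNat = pvFirstOcc cs m.toList := by omega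
    constructor
    · rw [if_pos hne']
      rw [PySem.Chars.slice_eq_listSlice, PySem.List.slice_to _ h0', List.take_take]
      unfold stepN
      rw [if_pos hfit, heq, Nat.min_eq_left (by omega)]
    · unfold stepN
      rw [if_pos hfit]
      omega
  · -- no fitting occurrence: A's find on the prefix fails and the cut is kept
    have hno : PySem.Chars.find (cs.take c) m.toList = -1 := by
      by_contra hne'
      have h0' : (0 : Int) ≤ PySem.Chars.find (cs.take c) m.toList := by
        have := PySem.Chars.neg_one_le_find (cs.take c) m.toList; omega
      obtain ⟨hoccp, _⟩ := PySem.Chars.find_spec (s := cs.take c) (sub := m.toList) h0'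
      have hjc : (PySem.Chars.find (cs.take c) m.toList).toNat ≤ c := by
        have h1 := PySem.Chars.find_le_length (cs.take c) m.toList
        have h2 : (cs.take c).length = c := by simp [List.length_take]; omega
        omega
      obtain ⟨hoccL, hfitL⟩ := occ_mp hoccp hjc
      have := (pvFirstOcc_min hoccL).2
      omega
    constructor
    · rw [if_neg (by simp [hno])]
      unfold stepN
      rw [if_neg hfit]
    · unfold stepN
      rw [if_neg hfit]

-- A's whole per-line truncation fold, tracked as a cut index
theorem truncFold_eq (markers : List String) : ∀ (cs : List Char) (c : Nat), c ≤ cs.length →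
    truncFold markers (cs.take c) = cs.take (markers.foldl (stepN cs) c)
      ∧ markers.foldl (stepN cs) c ≤ c := by
  induction markers with
  | nil => intro cs c hc; simp [truncFold]
  | cons m ms ih =>
    intro cs c hc
    obtain ⟨h1, h2⟩ := stepA_eq cs c hc m
    obtain ⟨ih1, ih2⟩ := ih cs (stepN cs c m) (le_trans h2 hc)
    simp only [truncFold, List.foldl] at *
    rw [h1]
    exact ⟨ih1, le_trans ih2 h2⟩

-- with no overlapping occurrences, A's sequential cut is the earliest occurrence of any marker
theorem fold_min (line : List Char) (markers : List String)
    (hb : pvOverlap markers line = false) :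
    ∀ (ms pre : List String), markers = pre ++ ms →
      ms.foldl (stepN line) (pvMinOcc line pre) = pvMinOcc line markers := by
  intro ms
  induction ms with
  | nil => intro pre hpre; simp only [List.foldl]; rw [hpre, List.append_nil]
  | cons m t ih =>
    intro pre hpre
    have hstep : stepN line (pvMinOcc line pre) m = pvMinOcc line (pre ++ [m]) := by
      have hmin : pvMinOcc line (pre ++ [m])
          = min (pvMinOcc line pre) (pvFirstOcc line m.toList) := by
        unfold pvMinOcc
        rw [List.foldl_append]
        rfl
      unfold stepN
      split_ifs with hfit
      · -- the first occurrence of m fits below the current cut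
        rw [hmin]
        have : pvFirstOcc line m.toList ≤ pvMinOcc line pre := by omega
        omega
      · -- no fit: Pre_ forbids pvFirstOcc m < current cut here
        rw [hmin]
        rcases Nat.le_total (pvMinOcc line pre) (pvFirstOcc line m.toList) with hle | hle
        · omega
        · by_cases heq : pvFirstOcc line m.toList = pvMinOcc line pre
          · omega
          · exfalso
            have hk : pre.length < markers.length := by
              rw [hpre, List.length_append]; simp
            have hget : markers[pre.length]? = some m := by
              rw [hpre, List.getElem?_append_right le_rfl]
              simp
            have htake : markers.take pre.length = pre := by
              rw [hpre, List.take_left]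
            have := List.any_eq_false.mp hb pre.length (List.mem_range.mpr hk)
            rw [hget, htake] at this
            simp only [decide_eq_true_eq] at this
            have hcA : pvMinOcc line pre < pvFirstOcc line m.toList + m.toList.length := by
              have := pvMinOcc_le line pre
              omega
            exact this ⟨by omega, hcA⟩
    rw [List.foldl_cons, hstep]
    exact ih (pre ++ [m]) (by rw [hpre, List.append_assoc]; rfl)

-- a first?-over-range characterisation (reused for B's position scan)
theorem find?_range_eq_some {p : Nat → Bool} {k : Nat} (hpk : p k = true)
    (hmin : ∀ j < k, p j = false) : ∀ {n : Nat}, k < n → (List.range n).find? p = some k := by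
  intro n
  induction n with
  | zero => intro h; omega
  | succ n ih =>
    intro hk
    rw [List.range_succ, List.find?_append]
    rcases Nat.lt_or_ge k n with h | h
    · rw [ih h]; rfl
    · have hkn : k = n := by omega
      subst hkn
      have hnone : (List.range k).find? p = none := by
        rw [List.find?_eq_none]
        intro x hx
        simp only [List.mem_range] at hx
        simp [hmin x hx]
      rw [hnone]
      simp [hpk]

-- B's position scan cuts exactly at the earliest occurrence of any marker
theorem altLine_eq (markers : List String) (cs : List Char) :
    solutionAltLine markers cs = pvRstripSp (cs.take (pvMinOcc cs markers)) := by
  unfold solutionAltLine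
  by_cases hlt : pvMinOcc cs markers < cs.length
  · -- a marker occurs: the scan stops at the minimum
    rcases pvMinOcc_achieved cs markers with h | ⟨m, hm, hfm⟩
    · omega
    have hfne : PySem.Chars.find cs m.toList ≠ -1 := by
      intro habs
      have : pvFirstOcc cs m.toList = cs.length := by unfold pvFirstOcc; rw [if_pos habs]
      omega
    obtain ⟨hocc, _⟩ := pvFirstOcc_occ hfne
    have hhit : (markers.any (fun m => PySem.Chars.startswith
        (cs.drop (pvMinOcc cs markers)) m.toList)) = true := by
      rw [List.any_eq_true]
      refine ⟨m, hm, ?_⟩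
      rw [PySem.Chars.startswith_iff, ← hfm]
      exact hocc
    have hmin : ∀ j < pvMinOcc cs markers, (markers.any (fun m => PySem.Chars.startswith
        (cs.drop j) m.toList)) = false := by
      intro j hj
      rw [List.any_eq_false]
      intro m' hm'
      rw [Bool.not_eq_true, ← Bool.not_eq_true, PySem.Chars.startswith_iff]
      intro hpre
      have h1 := (pvFirstOcc_min hpre).2
      have h2 := pvMinOcc_le_mem (line := cs) hm'
      omega
    rw [find?_range_eq_some hhit hmin (by omega)]
  · -- no marker occurs before the end of the line
    have hN : pvMinOcc cs markers = cs.length := by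
      have := pvMinOcc_le cs markers; omega
    by_cases hemp : ∃ m ∈ markers, m.toList = []
    · -- an empty marker: it matches at position 0, and the minimum is 0 (so the line is empty)
      obtain ⟨m, hm, hm0⟩ := hemp
      have hf0 : pvFirstOcc cs m.toList = 0 := by
        unfold pvFirstOcc
        rw [hm0]
        simp [PySem.Chars.find_nil]
      have hlen0 : cs.length = 0 := by
        have := pvMinOcc_le_mem (line := cs) hm
        omega
      have hcs : cs = [] := List.length_eq_zero_iff.mp hlen0
      subst hcs
      have hhit : (markers.any (fun m => PySem.Chars.startswith
          (List.drop 0 ([] : List Char)) m.toList)) = true := by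
        rw [List.any_eq_true]
        exact ⟨m, hm, by simp [PySem.Chars.startswith_iff, hm0]⟩
      rw [find?_range_eq_some hhit (by omega) (by omega)]
      simp
    · -- all markers non-empty and absent: the scan finds nothing
      rw [not_exists] at hemp
      simp only [not_and] at hemp
      have hnone : (List.range (cs.length + 1)).find? (fun p => markers.any
          (fun m => PySem.Chars.startswith (cs.drop p) m.toList)) = none := by
        rw [List.find?_eq_none]
        intro j hj
        rw [List.mem_range] at hj
        simp only [Bool.not_eq_true, List.any_eq_false]
        intro m' hm'
        rw [← Bool.not_eq_true, PySem.Chars.startswith_iff]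
        intro hpre
        by_cases hjlen : j < cs.length
        · have h1 := (pvFirstOcc_min hpre).2
          have h2 := pvMinOcc_le_mem (line := cs) hm'
          omega
        · have hjj : j = cs.length := by omega
          rw [hjj, List.drop_length, List.prefix_nil] at hpre
          exact hemp m' hm' hpre
      rw [hnone, hN, List.take_length]

-- joining the split back yields the original string (used for the empty-markers case)
theorem intercalate_merge (sep : List Char) : ∀ (xs : List (List Char)) (a b : List Char),
    sep.intercalate (xs ++ [a, b]) = sep.intercalate (xs ++ [a ++ sep ++ b]) := by
  intro xs
  induction xs with
  | nil => intro a b; simp [List.intercalate]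
  | cons x t ih =>
    intro a b
    cases t with
    | nil => simp [List.intercalate]
    | cons y u => simp [List.intercalate] at *; simp [ih]

theorem go_join (sep : List Char) (hsep : sep ≠ []) : ∀ (fuel : Nat) (l cur : List Char) (accl : List (List Char)),
    l.length < fuel →
    PySem.Chars.join sep (PySem.Chars.splitOn.go sep fuel l cur accl)
      = PySem.Chars.join sep (accl.reverse ++ [cur.reverse ++ l]) := by
  intro fuel
  induction fuel with
  | zero => intro l cur accl h; omega
  | succ fuel ih =>
    intro l cur accl h
    cases l with
    | nil =>
      simp [PySem.Chars.splitOn.go]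
    | cons c rest =>
      rw [PySem.Chars.splitOn.go]
      by_cases hp : sep.isPrefixOf (c :: rest) = true
      · rw [if_pos hp]
        have hpre : sep <+: (c :: rest) := List.isPrefixOf_iff_prefix.mp hp
        have hslen : 1 ≤ sep.length := by
          cases sep with
          | nil => exact absurd rfl hsep
          | cons a t => simp
        have hdlen : (List.drop sep.length (c :: rest)).length < fuel := by
          simp only [List.length_drop, List.length_cons] at *
          omega
        rw [ih (List.drop sep.length (c :: rest)) [] (cur.reverse :: accl) hdlen]
        have hsplit : (c :: rest) = sep ++ List.drop sep.length (c :: rest) := by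
          have h1 : sep = List.take sep.length (c :: rest) := List.prefix_iff_eq_take.mp hpre
          calc (c :: rest)
              = List.take sep.length (c :: rest) ++ List.drop sep.length (c :: rest) :=
                (List.take_append_drop _ _).symm
            _ = sep ++ List.drop sep.length (c :: rest) := by rw [← h1]
        unfold PySem.Chars.join
        rw [show (cur.reverse :: accl).reverse ++ [List.reverse [] ++ List.drop sep.length (c :: rest)]
              = accl.reverse ++ [cur.reverse, List.drop sep.length (c :: rest)] by simp]
        rw [intercalate_merge]
        conv_rhs => rw [hsplit]
        simp
      · rw [if_neg hp]
        rw [ih rest (c :: cur) accl (by simp at h ⊢; omega)]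
        simp

theorem join_splitOn (s : List Char) :
    PySem.Chars.join ['\n'] (PySem.Chars.splitOn s ['\n']) = s := by
  unfold PySem.Chars.splitOn
  rw [go_join ['\n'] (by simp) (s.length + 1) s [] [] (by omega)]
  simp [PySem.Chars.join, List.intercalate]

-- per-line equality under the no-overlap hypothesis
theorem line_eq (markers : List String) (cs : List Char)
    (hb : pvOverlap markers cs = false) (hne : markers ≠ []) :
    solutionLine markers cs = solutionAltLine markers cs := by
  unfold solutionLine
  rw [pairFold_eq]
  have hemp : markers.isEmpty = false := by
    cases markers with
    | nil => exact absurd rfl hne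
    | cons a t => rfl
  simp only [hemp, Bool.false_eq_true, if_false]
  have h1 := truncFold_eq markers cs cs.length le_rfl
  rw [List.take_length] at h1
  have h2 : pvMinOcc cs ([] : List String) = cs.length := rfl
  have h3 := fold_min cs markers hb markers [] rfl
  rw [h2] at h3
  rw [h1.1, h3, altLine_eq markers cs]

-- ===== VERDICT (by name: the statement is the Claim_ definition above) =====
theorem solution_spec : Claim_equal_solution := by
  intro string markers _ hpre
  unfold Spec_solution solution solution_alt
  by_cases hne : markers.isEmpty
  · have hm : markers = [] := List.isEmpty_iff.mp hne
    subst hm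
    rw [if_pos hne]
    have hid : ∀ cs ∈ PySem.Chars.splitOn string.toList ['\n'],
        solutionLine [] cs = id cs := by
      intro cs _
      rfl
    rw [List.map_congr_left hid, List.map_id, join_splitOn]
    exact String.ofList_toList
  · rw [if_neg (by simp [hne])]
    unfold Pre_solution at hpre
    rw [List.all_eq_true] at hpre
    have : ∀ cs ∈ PySem.Chars.splitOn string.toList ['\n'],
        solutionLine markers cs = solutionAltLine markers cs := by
      intro cs hcs
      have := hpre cs hcs
      simp only [Bool.not_eq_eq_eq_not, Bool.not_true] at this
      exact line_eq markers cs this (by simpa using hne)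
    rw [List.map_congr_left this]
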